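-- pv_equiv track=rewrite | github.com/openmovementproject/openmovement-python | src/openmovement/cwa_load.py | _fast_timestamp
-- ===== SOURCE A (Python) =====
-- def _fast_timestamp(value):
--     """Faster date/time parsing.  This does not include 'always' limits; invalid dates do not cause an error; the first call will be slower as a lookup table is created."""
--     # On first run, build lookup table for initial 10-bits of the packed date-time parsing, minus one day as days are 1-indexed
--     if not hasattr(_fast_timestamp, "SECONDS_BEFORE_YEAR_MONTH"):
--         _fast_timestamp.SECONDS_BEFORE_YEAR_MONTH = [0] * 1024        # YYYYYYMM MM (Y=years since 2000, M=month-of-year 1-indexed)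
--         SECONDS_PER_DAY = 24 * 60 * 60
--         DAYS_IN_MONTH = [ 0, 31, 28, 31, 30, 31, 30, 31, 31, 30, 31, 30, 31, 0, 0, 0 ]    # invalid month 0, months 1-12 (non-leap-year), invalid months 13-15
--         seconds_before = 946684800      # Seconds from UNIX epoch (1970) until device epoch (2000)
--         for year in range(0, 64):       # 2000-2063
--             for month in range(0, 16):  # invalid month 0, months 1-12, invalid months 13-15
--                 index = (year << 4) + month
--                 _fast_timestamp.SECONDS_BEFORE_YEAR_MONTH[index] = seconds_before - SECONDS_PER_DAY    # minus one day as day-of-month is 1-based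
--                 days = DAYS_IN_MONTH[month]
--                 if year % 4 == 0 and month == 2:    # Correct for this year range (2000 was a leap year, despite being a multiple of 100, as it is a multiple of 400)
--                     days += 1
--                 seconds_before += days * SECONDS_PER_DAY
--
--     year_month = (value >> 22) & 0x3ff
--     day   = (value >> 17) & 0x1f
--     hours = (value >> 12) & 0x1f
--     mins  = (value >>  6) & 0x3f
--     secs  = value & 0x3f
--     return _fast_timestamp.SECONDS_BEFORE_YEAR_MONTH[year_month] + ((day * 24 + hours) * 60 + mins) * 60 + secs
-- ===== SOURCE B (Python) =====
-- # Closed-form seconds offset (years*365 + leap count + cumulative month days) instead of A's 1024-entry table.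
-- _CUM_DAYS = (0, 0, 31, 59, 90, 120, 151, 181, 212, 243, 273, 304, 334, 365)
--
-- def _fast_timestamp(value):
--     year_month = (value >> 22) & 0x3ff
--     year = year_month >> 4
--     month = year_month & 0xf
--     days = year * 365 + (year + 3) // 4 + _CUM_DAYS[min(month, 13)]
--     if year % 4 == 0 and month > 2:
--         days += 1
--     day = (value >> 17) & 0x1f
--     hours = (value >> 12) & 0x1f
--     mins = (value >> 6) & 0x3f
--     secs = value & 0x3f
--     return 946598400 + days * 86400 + ((day * 24 + hours) * 60 + mins) * 60 + secs
-- ===== Notes on version B (the rewrite author's own statement) =====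
-- stated objective: simpler
-- what changed: B drops A's precomputed per-(year,month) SECONDS_BEFORE_YEAR_MONTH table (built by a nested accumulation loop over all years and months) and computes the seconds offset in closed form: whole prior years times the year length, a floor-division leap-day count, and a small cumulative month-days lookup clamped so the invalid month codes contribute exactly what A's accumulation gives them.
import Mathlib
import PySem

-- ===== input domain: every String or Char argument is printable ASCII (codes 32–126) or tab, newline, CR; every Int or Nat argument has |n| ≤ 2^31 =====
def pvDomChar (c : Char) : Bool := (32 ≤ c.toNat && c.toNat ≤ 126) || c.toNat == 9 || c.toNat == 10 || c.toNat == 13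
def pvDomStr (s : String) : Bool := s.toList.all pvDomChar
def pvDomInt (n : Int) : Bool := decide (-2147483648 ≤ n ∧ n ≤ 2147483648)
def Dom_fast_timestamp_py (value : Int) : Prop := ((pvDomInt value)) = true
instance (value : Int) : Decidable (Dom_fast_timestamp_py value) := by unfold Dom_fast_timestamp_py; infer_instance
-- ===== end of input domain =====

-- B replaces A's 1024-entry precomputed seconds table with a closed-form arithmetic
-- computation (whole years + leap count + cumulative month days): simpler, no table build.


-- ===== PORT A =====
-- DAYS_IN_MONTH table of A (invalid month 0, months 1-12 non-leap, invalid months 13-15)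
def pvDaysInMonth : List Int := [0, 31, 28, 31, 30, 31, 30, 31, 31, 30, 31, 30, 31, 0, 0, 0]

-- A's one-time setup loop building SECONDS_BEFORE_YEAR_MONTH (first component; second
-- component is the running seconds_before accumulator).  Every index hit is in 0..1023.
def pvTableA : List Int × Int :=
  (PySem.List.pyRange 0 64 1).foldl (fun (st : List Int × Int) (year : Int) =>
    (PySem.List.pyRange 0 16 1).foldl (fun (st : List Int × Int) (month : Int) =>
      let index := (year <<< (4 : Nat)) + month
      let table := PySem.List.pySetD st.1 index (st.2 - 24 * 60 * 60)
      let days := PySem.List.pyGetD pvDaysInMonth month 0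
      let days := if PySem.Int.mod year 4 = 0 ∧ month = 2 then days + 1 else days
      (table, st.2 + days * (24 * 60 * 60))) st)
    (List.replicate 1024 (0 : Int), 946684800)

def fast_timestamp_py (value : Int) : Int :=
  let year_month := PySem.Int.band (value >>> (22 : Nat)) 0x3ff
  let day := PySem.Int.band (value >>> (17 : Nat)) 0x1f
  let hours := PySem.Int.band (value >>> (12 : Nat)) 0x1f
  let mins := PySem.Int.band (value >>> (6 : Nat)) 0x3f
  let secs := PySem.Int.band value 0x3f
  PySem.List.pyGetD pvTableA.1 year_month 0 + ((day * 24 + hours) * 60 + mins) * 60 + secs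

-- ===== PORT B =====
def pvCumDays : List Int := [0, 0, 31, 59, 90, 120, 151, 181, 212, 243, 273, 304, 334, 365]

-- Source B's computation of the seconds before the (year, month) packed in the top 10 bits,
-- minus one day (day-of-month is 1-based), counted from the UNIX epoch.
def pvSecondsBefore (year_month : Int) : Int :=
  let year := year_month >>> (4 : Nat)
  let month := PySem.Int.band year_month 0xf
  let days := year * 365 + PySem.Int.floordiv (year + 3) 4
      + PySem.List.pyGetD pvCumDays (min month 13) 0
  let days := if PySem.Int.mod year 4 = 0 ∧ 2 < month then days + 1 else days
  946598400 + days * 86400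

def fast_timestamp_py_alt (value : Int) : Int :=
  let year_month := PySem.Int.band (value >>> (22 : Nat)) 0x3ff
  let day := PySem.Int.band (value >>> (17 : Nat)) 0x1f
  let hours := PySem.Int.band (value >>> (12 : Nat)) 0x1f
  let mins := PySem.Int.band (value >>> (6 : Nat)) 0x3f
  let secs := PySem.Int.band value 0x3f
  pvSecondsBefore year_month + ((day * 24 + hours) * 60 + mins) * 60 + secs

-- ===== PRECONDITION & SPEC =====
def Spec_fast_timestamp_py (value : Int) (out : Int) : Prop := out = fast_timestamp_py_alt value
instance (value : Int) (out : Int) : Decidable (Spec_fast_timestamp_py value out) := by unfold Spec_fast_timestamp_py; infer_instance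

-- ===== CLAIM (what is proved, stated in full; the proofs are below) =====
def Claim_equal_fast_timestamp_py : Prop := ∀ (value : Int), Dom_fast_timestamp_py value → Spec_fast_timestamp_py value (fast_timestamp_py value)

-- ===== LEMMAS AND PROOFS =====

-- masking with 0x3ff always lands in [0, 1024)  (Python & of any int with a nonneg mask)
theorem pv_band_mask_bounds (a : Int) : 0 ≤ PySem.Int.band a 1023 ∧ PySem.Int.band a 1023 < 1024 := by
  unfold PySem.Int.band
  split_ifs with h1 h2 h3
  · refine ⟨Int.natCast_nonneg _, ?_⟩
    have := Nat.and_le_right (n := a.toNat) (m := (1023 : Int).toNat)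
    omega
  · omega
  · refine ⟨Int.natCast_nonneg _, ?_⟩
    have : (1023 : Int).toNat - ((1023 : Int).toNat &&& (-a - 1).toNat) ≤ (1023 : Int).toNat :=
      Nat.sub_le _ _
    omega
  · omega

-- the running seconds_before accumulator after k inner-loop steps, in closed form
def pvSbAt (k : Nat) : Int := pvSecondsBefore (k : Int) + 86400

-- invariant on the table after the first k inner-loop steps
def pvTInv (k : Nat) (T : List Int) : Prop :=
  T.length = 1024 ∧ ∀ j : Nat, j < 1024 → T.getD j 0 = if j < k then pvSecondsBefore (j : Int) else 0

-- one accumulator step of A's setup loop matches B's closed form (checked over all 1024 steps)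
set_option maxRecDepth 8192 in
theorem pv_step_sb : ∀ i : Fin 1024,
    pvSbAt ((i : Nat) + 1) = pvSbAt (i : Nat)
      + (if PySem.Int.mod (((i : Nat) / 16 : Nat) : Int) 4 = 0 ∧ (((i : Nat) % 16 : Nat) : Int) = 2
          then PySem.List.pyGetD pvDaysInMonth ((((i : Nat)) % 16 : Nat) : Int) 0 + 1
          else PySem.List.pyGetD pvDaysInMonth ((((i : Nat)) % 16 : Nat) : Int) 0) * (24 * 60 * 60) := by
  decide

theorem pv_inner (y : Nat) (hy : y < 64) :
    ∀ (n m : Nat), m + n = 16 → ∀ (T : List Int) (s : Int), pvTInv (16 * y + m) T → s = pvSbAt (16 * y + m) →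
      pvTInv (16 * (y + 1))
          ((PySem.List.pyRange (m : Int) 16 1).foldl (fun (st : List Int × Int) (month : Int) =>
            let index := (((y : Nat) : Int) <<< (4 : Nat)) + month
            let table := PySem.List.pySetD st.1 index (st.2 - 24 * 60 * 60)
            let days := PySem.List.pyGetD pvDaysInMonth month 0
            let days := if PySem.Int.mod ((y : Nat) : Int) 4 = 0 ∧ month = 2 then days + 1 else days
            (table, st.2 + days * (24 * 60 * 60))) (T, s)).1
      ∧ ((PySem.List.pyRange (m : Int) 16 1).foldl (fun (st : List Int × Int) (month : Int) =>
            let index := (((y : Nat) : Int) <<< (4 : Nat)) + month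
            let table := PySem.List.pySetD st.1 index (st.2 - 24 * 60 * 60)
            let days := PySem.List.pyGetD pvDaysInMonth month 0
            let days := if PySem.Int.mod ((y : Nat) : Int) 4 = 0 ∧ month = 2 then days + 1 else days
            (table, st.2 + days * (24 * 60 * 60))) (T, s)).2 = pvSbAt (16 * (y + 1)) := by
  intro n
  induction n with
  | zero =>
    intro m hm T s hT hs
    have h16 : m = 16 := by omega
    subst h16
    rw [PySem.List.pyRange_one_eq_nil (by norm_num)]
    simpa [List.foldl, show 16 * y + 16 = 16 * (y + 1) by ring] using And.intro hT hs
  | succ n ih =>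
    intro m hm T s hT hs
    have hmlt : m < 16 := by omega
    rw [PySem.List.pyRange_one_cons (a := (m : Int)) (b := 16) (by exact_mod_cast hmlt)]
    rw [List.foldl_cons]
    have hcast : ((m : Int) + 1) = (((m + 1 : Nat)) : Int) := by push_cast; ring
    rw [hcast]
    have hidx : (((y : Nat) : Int) <<< (4 : Nat)) + (m : Int) = ((16 * y + m : Nat) : Int) := by
      rw [Int.shiftLeft_eq]; push_cast; ring
    have hTlen := hT.1
    have hTget := hT.2
    have happ := ih (m + 1) (by omega)
        (T.set (16 * y + m) (s - 24 * 60 * 60))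
        (s + (if PySem.Int.mod ((y : Nat) : Int) 4 = 0 ∧ (m : Int) = 2
              then PySem.List.pyGetD pvDaysInMonth (m : Int) 0 + 1
              else PySem.List.pyGetD pvDaysInMonth (m : Int) 0) * (24 * 60 * 60))
        (by
          refine ⟨by simpa using hTlen, ?_⟩
          intro j hj
          by_cases hje : j = 16 * y + m
          · subst hje
            rw [if_pos (by omega)]
            rw [List.getD_eq_getElem?_getD, List.getElem?_set, if_pos rfl, if_pos (by omega)]
            simp only [Option.getD_some]
            rw [hs]
            unfold pvSbAt
            omega
          · rw [List.getD_eq_getElem?_getD, List.getElem?_set, if_neg (by omega),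
              ← List.getD_eq_getElem?_getD, hTget j hj]
            by_cases hlt : j < 16 * y + m
            · rw [if_pos hlt, if_pos (by omega)]
            · rw [if_neg hlt, if_neg (by omega)])
        (by
          rw [hs]
          have hstep := pv_step_sb ⟨16 * y + m, by omega⟩
          simp only at hstep
          have hdiv : (16 * y + m) / 16 = y := by omega
          have hmod : (16 * y + m) % 16 = m := by omega
          rw [hdiv, hmod] at hstep
          rw [show 16 * y + m + 1 = 16 * y + (m + 1) by ring] at hstep
          exact hstep.symm)
    simp only
    rw [hidx, PySem.List.pySetD_natCast]
    exact happ

theorem pv_outer :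
    ∀ (n y : Nat), y + n = 64 → ∀ (T : List Int) (s : Int), pvTInv (16 * y) T → s = pvSbAt (16 * y) →
      pvTInv 1024
          ((PySem.List.pyRange (y : Int) 64 1).foldl (fun (st : List Int × Int) (year : Int) =>
            (PySem.List.pyRange 0 16 1).foldl (fun (st : List Int × Int) (month : Int) =>
              let index := (year <<< (4 : Nat)) + month
              let table := PySem.List.pySetD st.1 index (st.2 - 24 * 60 * 60)
              let days := PySem.List.pyGetD pvDaysInMonth month 0
              let days := if PySem.Int.mod year 4 = 0 ∧ month = 2 then days + 1 else days
              (table, st.2 + days * (24 * 60 * 60))) st) (T, s)).1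
      ∧ ((PySem.List.pyRange (y : Int) 64 1).foldl (fun (st : List Int × Int) (year : Int) =>
            (PySem.List.pyRange 0 16 1).foldl (fun (st : List Int × Int) (month : Int) =>
              let index := (year <<< (4 : Nat)) + month
              let table := PySem.List.pySetD st.1 index (st.2 - 24 * 60 * 60)
              let days := PySem.List.pyGetD pvDaysInMonth month 0
              let days := if PySem.Int.mod year 4 = 0 ∧ month = 2 then days + 1 else days
              (table, st.2 + days * (24 * 60 * 60))) st) (T, s)).2 = pvSbAt 1024 := by
  intro n
  induction n with
  | zero =>
    intro y hy T s hT hs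
    have h64 : y = 64 := by omega
    subst h64
    rw [PySem.List.pyRange_one_eq_nil (a := ((64 : Nat) : Int)) (b := 64) (by norm_num)]
    rw [List.foldl_nil]
    exact ⟨by simpa using hT, by simpa using hs⟩
  | succ n ih =>
    intro y hy T s hT hs
    have hylt : y < 64 := by omega
    rw [PySem.List.pyRange_one_cons (a := (y : Int)) (b := 64) (by exact_mod_cast hylt)]
    rw [List.foldl_cons]
    have hcast : ((y : Int) + 1) = (((y + 1 : Nat)) : Int) := by push_cast; ring
    rw [hcast]
    have hin := pv_inner y hylt 16 0 (by omega) T s (by simpa using hT) (by simpa using hs)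
    rw [show ((0 : Nat) : Int) = (0 : Int) by norm_num] at hin
    have hfin := ih (y + 1) (by omega) _ _ hin.1 hin.2
    rw [← Prod.mk.eta
      (p := (PySem.List.pyRange 0 16 1).foldl (fun (st : List Int × Int) (month : Int) =>
        let index := (((y : Nat) : Int) <<< (4 : Nat)) + month
        let table := PySem.List.pySetD st.1 index (st.2 - 24 * 60 * 60)
        let days := PySem.List.pyGetD pvDaysInMonth month 0
        let days := if PySem.Int.mod ((y : Nat) : Int) 4 = 0 ∧ month = 2 then days + 1 else days
        (table, st.2 + days * (24 * 60 * 60))) (T, s))]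
    exact hfin

theorem pv_table_lookup (n : Nat) (hn : n < 1024) :
    PySem.List.pyGetD pvTableA.1 ((n : Nat) : Int) 0 = pvSecondsBefore ((n : Nat) : Int) := by
  have h0 : pvTInv 0 (List.replicate 1024 (0 : Int)) := by
    refine ⟨List.length_replicate, ?_⟩
    intro j hj
    rw [List.getD_replicate _ hj, if_neg (by omega)]
  have hsb0 : (946684800 : Int) = pvSbAt 0 := by decide
  have hall := pv_outer 64 0 (by omega) (List.replicate 1024 (0 : Int)) 946684800
    (by rw [Nat.mul_zero]; exact h0) (by rw [Nat.mul_zero]; exact hsb0)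
  unfold pvTableA
  rw [show ((0 : Nat) : Int) = (0 : Int) by norm_num] at hall
  rw [PySem.List.pyGetD_natCast]
  rw [hall.1.2 n hn, if_pos hn]

-- ===== VERDICT (by name: the statement is the Claim_ definition above) =====
theorem fast_timestamp_py_spec : Claim_equal_fast_timestamp_py := by
  unfold Claim_equal_fast_timestamp_py Spec_fast_timestamp_py
  intro value _
  unfold fast_timestamp_py fast_timestamp_py_alt
  simp only
  have hb := pv_band_mask_bounds (value >>> (22 : Nat))
  congr 2
  have hB : PySem.Int.band (value >>> (22 : Nat)) 1023
      = (((PySem.Int.band (value >>> (22 : Nat)) 1023).toNat : Nat) : Int) := by omega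
  rw [hB]
  exact pv_table_lookup _ (by omega)
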